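-- pv_equiv track=rewrite | github.com/anshatwork/FinalYearProjectGenerator | output/special-positions-in-a-binary-matrix.py | solve
-- ===== SOURCE A (Python) =====
-- def solve(mat):
--     # Get matrix dimensions
--     m = len(mat)
--     n = len(mat[0])
--
--     # Initialize row and column counters
--     row_counts = [0] * m
--     col_counts = [0] * n
--
--     # Create a list to store positions of 1s
--     positions = []
--
--     # Iterate over the matrix, counting rows and columns with exactly one 1
--     for i in range(m):
--         for j in range(n):
--             if mat[i][j] == 1:
--                 row_counts[i] += 1
--                 col_counts[j] += 1
--                 positions.append((i, j))
--
--     # Count the number of special positions (where both row and column counts are 1)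
--     count = 0
--     for pos in positions:
--         if row_counts[pos[0]] == 1 and col_counts[pos[1]] == 1:
--             count += 1
--
--     return count
-- ===== SOURCE B (Python) =====
-- def solve(mat):
--     def lone_one_in_column(j):
--         return sum(1 for row in mat if row[j] == 1) == 1
--
--     count = 0
--     for row in mat:
--         if row.count(1) == 1 and lone_one_in_column(row.index(1)):
--             count += 1
--     return count
-- ===== Notes on version B (the rewrite author's own statement) =====
-- stated objective: simpler
-- what changed: Replaces A's grid-wide row/column counter tables and stored list of 1-positions with a per-row candidate test: only rows containing exactly one 1 are considered, and for each the single column of that 1 is scanned on demand; Pre_ excludes the empty matrix and ragged matrices, where A raises IndexError on rows shorter than the first row and A's ignoring of cells beyond the first row's width in longer rows is an artefact of indexing by len(mat[0]).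
-- outside the precondition, e.g. on solve([[1, 0], [0, 1, 1]]): A returns 2, B returns 1; on solve([]): A raises IndexError, B returns 0
import Mathlib
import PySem

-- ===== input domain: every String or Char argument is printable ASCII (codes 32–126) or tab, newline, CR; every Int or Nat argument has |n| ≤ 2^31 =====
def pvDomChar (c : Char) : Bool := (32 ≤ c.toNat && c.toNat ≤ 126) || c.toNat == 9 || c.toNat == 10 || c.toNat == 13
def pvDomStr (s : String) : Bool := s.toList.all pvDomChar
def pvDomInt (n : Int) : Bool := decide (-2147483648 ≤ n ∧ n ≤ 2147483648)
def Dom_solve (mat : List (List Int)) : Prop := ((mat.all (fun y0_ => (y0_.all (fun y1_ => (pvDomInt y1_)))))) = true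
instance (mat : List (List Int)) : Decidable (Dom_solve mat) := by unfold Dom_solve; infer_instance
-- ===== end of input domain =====

-- B drops A's counter tables and stored 1-positions: it tests each row for a lone 1 and
-- scans only that column on demand (objective: simpler).

-- ===== PORT A =====
-- Python's range indices are nonnegative, so list indexing is ported with Nat indices
-- (List.range / getD), exact under Pre_solve (i < len(mat), j < len(mat[i])).
def solve (mat : List (List Int)) : Int :=
  let m := mat.length
  let n := (mat.getD 0 []).length      -- mat[0]: exact under Pre_solve (mat ≠ [])
  let st := (List.range m).foldl (fun st i =>
      (List.range n).foldl (fun (st : List Int × List Int × List (Nat × Nat)) j =>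
        if (mat.getD i []).getD j 0 = 1 then
          (st.1.set i (st.1.getD i 0 + 1), st.2.1.set j (st.2.1.getD j 0 + 1), st.2.2 ++ [(i, j)])
        else st) st)
    (List.replicate m (0 : Int), List.replicate n (0 : Int), ([] : List (Nat × Nat)))
  st.2.2.foldl (fun cnt p => if st.1.getD p.1 0 = 1 ∧ st.2.1.getD p.2 0 = 1 then cnt + 1 else cnt) 0

-- ===== PORT B =====
-- row[j] is ported with PySem.List.pyGet? (exact under Pre_solve: j < every row's length);
-- the 'sum(1 for … if …) == 1' test is the countP of the filter condition.
def loneOneInColumn (mat : List (List Int)) (j : Nat) : Bool :=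
  mat.countP (fun row => PySem.List.pyGet? row (j : Int) == some 1) == 1

def solve_alt (mat : List (List Int)) : Int :=
  mat.foldl (fun count row =>
    if row.count 1 = 1 then             -- 'and' is short-circuit: row.index(1) only under the guard
      if loneOneInColumn mat ((PySem.List.index? row 1).getD 0) then count + 1 else count
    else count) 0

-- ===== PRECONDITION & SPEC =====
-- Pre_solve excludes the empty matrix (A raises IndexError on mat[0]) and ragged matrices:
-- rows shorter than the first row make A raise IndexError, and A returning a value that
-- ignores cells beyond the first row's width in longer rows is an artefact of indexing by
-- len(mat[0]); B is the natural algorithm on rectangular matrices.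
def Pre_solve (mat : List (List Int)) : Prop :=
  mat ≠ [] ∧ ∀ r ∈ mat, r.length = (mat.getD 0 []).length
instance (mat : List (List Int)) : Decidable (Pre_solve mat) := by unfold Pre_solve; infer_instance

def pvWitness_solve : List (List Int) := [[1, 0], [0, 1]]

def Spec_solve (mat : List (List Int)) (out : Int) : Prop := out = solve_alt mat
instance (mat : List (List Int)) (out : Int) : Decidable (Spec_solve mat out) := by unfold Spec_solve; infer_instance

-- ===== CLAIM (what is proved, stated in full; the proofs are below) =====
def Claim_equal_solve : Prop := ∀ (mat : List (List Int)), Dom_solve mat → Pre_solve mat → Spec_solve mat (solve mat)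

-- ===== LEMMAS AND PROOFS =====

-- entry, row/column 1-counts, and the common counting form both ports reduce to
def pvEnt (mat : List (List Int)) (p : Nat × Nat) : Int := (mat.getD p.1 []).getD p.2 0
def pvGrid (m n : Nat) : List (Nat × Nat) := (List.range m).flatMap (fun i => (List.range n).map (fun j => (i, j)))
def pvRT (mat : List (List Int)) (i : Nat) : Nat :=
  (List.range (mat.getD 0 []).length).countP (fun j => decide (pvEnt mat (i, j) = 1))
def pvCT (mat : List (List Int)) (j : Nat) : Nat :=
  (List.range mat.length).countP (fun i => decide (pvEnt mat (i, j) = 1))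
def pvCommon (mat : List (List Int)) : Nat :=
  (pvGrid mat.length (mat.getD 0 []).length).countP
    (fun p => decide (pvEnt mat p = 1 ∧ pvRT mat p.1 = 1 ∧ pvCT mat p.2 = 1))

-- A's inner-loop body on a (row, column) pair
def pvStepA (mat : List (List Int)) (st : List Int × List Int × List (Nat × Nat)) (p : Nat × Nat) :
    List Int × List Int × List (Nat × Nat) :=
  if pvEnt mat p = 1 then
    (st.1.set p.1 (st.1.getD p.1 0 + 1), st.2.1.set p.2 (st.2.1.getD p.2 0 + 1), st.2.2 ++ [p])
  else st

theorem nested_to_grid {σ : Type} (m n : Nat) (h : σ → (Nat × Nat) → σ) (init : σ) :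
    (List.range m).foldl (fun st i => (List.range n).foldl (fun st j => h st (i, j)) st) init
      = (pvGrid m n).foldl h init := by
  unfold pvGrid
  rw [List.flatMap_def, List.foldl_flatten, List.foldl_map]
  simp only [List.foldl_map]

theorem foldl_prod3 {α β γ δ : Type} (f1 : α → δ → α) (f2 : β → δ → β) (f3 : γ → δ → γ) :
    ∀ (l : List δ) (a : α) (b : β) (c : γ),
      l.foldl (fun s x => (f1 s.1 x, f2 s.2.1 x, f3 s.2.2 x)) (a, b, c) = (l.foldl f1 a, l.foldl f2 b, l.foldl f3 c)
  | [], _, _, _ => rfl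
  | x :: t, a, b, c => by
      simp only [List.foldl_cons]
      exact foldl_prod3 f1 f2 f3 t (f1 a x) (f2 b x) (f3 c x)

theorem foldl_set_incr {δ : Type} (key : δ → Nat) (q : δ → Prop) [DecidablePred q] :
    ∀ (l : List δ) (c : List Int) (k : Nat), k < c.length →
      (l.foldl (fun c x => if q x then c.set (key x) (c.getD (key x) 0 + 1) else c) c).getD k 0
        = c.getD k 0 + (l.countP (fun x => decide (q x ∧ key x = k)) : Int)
  | [], c, k, hk => by simp
  | x :: t, c, k, hk => by
      simp only [List.foldl_cons, List.countP_cons]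
      by_cases hq : q x
      · by_cases hkey : key x = k
        · rw [if_pos hq]
          rw [foldl_set_incr key q t _ k (by simpa using hk)]
          rw [List.getD_eq_getElem?_getD, hkey, List.getElem?_set_self hk]
          simp only [Option.getD_some, hq, decide_true, and_self, if_true]
          push_cast
          ring
        · rw [if_pos hq]
          rw [foldl_set_incr key q t _ k (by simpa using hk)]
          rw [List.getD_eq_getElem?_getD, List.getElem?_set_ne (by omega)]
          simp [hq, hkey, ← List.getD_eq_getElem?_getD]
      · rw [if_neg hq]
        rw [foldl_set_incr key q t c k hk]
        simp [hq]

theorem sum_map_onehot : ∀ (l : List Nat), l.Nodup → ∀ (f : Nat → Nat) (i : Nat), i ∈ l →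
    (∀ x ∈ l, x ≠ i → f x = 0) → (l.map f).sum = f i
  | [], _, _, _, hi, _ => by simp at hi
  | a :: t, hnd, f, i, hi, hf => by
      simp only [List.map_cons, List.sum_cons]
      rcases List.mem_cons.1 hi with rfl | hit
      · have hz : ∀ x ∈ t, f x = 0 := fun x hx =>
          hf x (List.mem_cons_of_mem _ hx) (fun h => (List.nodup_cons.1 hnd).1 (h ▸ hx))
        have : (t.map f).sum = 0 := by
          rw [List.sum_eq_zero]; intro y hy
          rcases List.mem_map.1 hy with ⟨x, hx, rfl⟩; exact hz x hx
        omega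
      · have ha : f a = 0 := hf a (List.mem_cons_self) (fun h => (List.nodup_cons.1 hnd).1 (h ▸ hit))
        rw [ha, sum_map_onehot t (List.nodup_cons.1 hnd).2 f i hit
          (fun x hx hxi => hf x (List.mem_cons_of_mem _ hx) hxi)]
        omega

theorem countP_onehot (p : Nat → Prop) [DecidablePred p] :
    ∀ (l : List Nat), l.Nodup → ∀ j ∈ l,
      l.countP (fun x => decide (p x ∧ x = j)) = if p j then 1 else 0
  | [], _, j, hj => by simp at hj
  | a :: t, hnd, j, hj => by
      simp only [List.countP_cons]
      rcases List.mem_cons.1 hj with rfl | hjt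
      · have hz : t.countP (fun x => decide (p x ∧ x = j)) = 0 := by
          rw [List.countP_eq_zero]
          intro x hx; simp only [decide_eq_true_eq, not_and]
          intro _ h; exact absurd (h ▸ hx) (List.nodup_cons.1 hnd).1
        rw [hz]
        by_cases hp : p j
        · simp [hp]
        · simp [hp]
      · rw [countP_onehot p t (List.nodup_cons.1 hnd).2 j hjt]
        have : ¬ (p a ∧ a = j) := fun ⟨_, h⟩ => (List.nodup_cons.1 hnd).1 (h ▸ hjt)
        simp [this]

theorem sum_map_ite_eq_countP (p : Nat → Prop) [DecidablePred p] :
    ∀ (l : List Nat), (l.map (fun x => if p x then 1 else 0)).sum = l.countP (fun x => decide (p x))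
  | [] => rfl
  | a :: t => by
      simp only [List.map_cons, List.sum_cons, List.countP_cons, sum_map_ite_eq_countP p t]
      by_cases hp : p a
      · simp only [hp, if_true, decide_true]
        omega
      · simp [hp]

theorem mem_pvGrid {m n : Nat} {p : Nat × Nat} : p ∈ pvGrid m n ↔ p.1 < m ∧ p.2 < n := by
  obtain ⟨i, j⟩ := p
  simp [pvGrid, List.mem_flatMap]

theorem countP_grid_fst (m n i : Nat) (hi : i < m) (q : Nat × Nat → Prop) [DecidablePred q] :
    (pvGrid m n).countP (fun p => decide (q p ∧ p.1 = i)) = (List.range n).countP (fun j => decide (q (i, j))) := by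
  unfold pvGrid
  rw [List.countP_flatMap]
  rw [sum_map_onehot _ (List.nodup_range) _ i (List.mem_range.2 hi) ?_]
  · simp [List.countP_map, Function.comp_def]
  · intro x _ hxi
    simp only [Function.comp_apply, List.countP_map]
    rw [List.countP_eq_zero]
    intro j _; simp [hxi]

theorem countP_grid_snd (m n j : Nat) (hj : j < n) (q : Nat × Nat → Prop) [DecidablePred q] :
    (pvGrid m n).countP (fun p => decide (q p ∧ p.2 = j)) = (List.range m).countP (fun i => decide (q (i, j))) := by
  unfold pvGrid
  rw [List.countP_flatMap]
  have h1 : ∀ i : Nat, (List.countP (fun p => decide (q p ∧ p.2 = j)) ∘ fun i => (List.range n).map (fun j => (i, j))) i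
      = if q (i, j) then 1 else 0 := by
    intro i
    simp only [Function.comp_apply, List.countP_map]
    have := countP_onehot (fun j' => q (i, j')) (List.range n) List.nodup_range j (List.mem_range.2 hj)
    simpa [Function.comp_def] using this
  rw [List.map_congr_left (fun i _ => h1 i)]
  exact sum_map_ite_eq_countP _ _

theorem count_take_eq_countP (r : List Int) :
    ∀ n, n ≤ r.length → (r.take n).count 1 = (List.range n).countP (fun j => decide (r.getD j 0 = 1))
  | 0, _ => by simp
  | n + 1, hn => by
      have hlt : n < r.length := by omega
      rw [List.take_add_one, List.range_succ, List.countP_append]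
      rw [List.count_append, count_take_eq_countP r n (by omega)]
      have hg : r[n]? = some r[n] := List.getElem?_eq_getElem hlt
      rw [hg]
      simp only [Option.toList_some, List.countP_singleton, List.count_singleton]
      rw [List.getD_eq_getElem _ _ hlt]
      simp

theorem countP_eq_countP_range (q : List Int → Prop) [DecidablePred q] :
    ∀ (l : List (List Int)),
      l.countP (fun r => decide (q r)) = (List.range l.length).countP (fun i => decide (q (l.getD i [])))
  | [] => rfl
  | a :: t => by
      rw [List.countP_cons, List.length_cons, List.range_succ_eq_map, List.countP_cons,
        List.countP_map, countP_eq_countP_range q t]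
      simp [Function.comp_def]
      apply List.countP_congr
      intro x _
      simp

-- in a duplicate-free list, a predicate holding exactly once pins its witness
theorem countP_one_unique (p : Nat → Prop) [DecidablePred p] :
    ∀ (l : List Nat), l.Nodup → l.countP (fun x => decide (p x)) = 1 →
      ∀ j0 ∈ l, p j0 → ∀ x ∈ l, p x → x = j0
  | [], _, _, j0, hj0, _, _, hx, _ => by simp at hj0
  | a :: t, hnd, h1, j0, hj0, hp0, x, hx, hpx => by
      obtain ⟨hna, hndt⟩ := List.nodup_cons.1 hnd
      rw [List.countP_cons] at h1
      by_cases hpa : p a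
      · have hone : (if decide (p a) = true then 1 else 0) = 1 := by simp [hpa]
        have hzt : t.countP (fun x => decide (p x)) = 0 := by omega
        have hnone : ∀ y ∈ t, ¬ p y := by
          intro y hy hpy
          have := List.countP_eq_zero.1 hzt y hy
          simp [hpy] at this
        have hj0a : j0 = a := by
          rcases List.mem_cons.1 hj0 with rfl | h
          · rfl
          · exact absurd hp0 (hnone _ h)
        have hxa : x = a := by
          rcases List.mem_cons.1 hx with rfl | h
          · rfl
          · exact absurd hpx (hnone _ h)
        rw [hxa, hj0a]
      · have hzero : (if decide (p a) = true then 1 else 0) = 0 := by simp [hpa]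
        have h1t : t.countP (fun x => decide (p x)) = 1 := by omega
        have hj0t : j0 ∈ t := by
          rcases List.mem_cons.1 hj0 with rfl | h
          · exact absurd hp0 hpa
          · exact h
        have hxt : x ∈ t := by
          rcases List.mem_cons.1 hx with rfl | h
          · exact absurd hpx hpa
          · exact h
        exact countP_one_unique p t hndt h1t j0 hj0t hp0 x hxt hpx

theorem solve_eq_common (mat : List (List Int)) :
    solve mat = (pvCommon mat : Int) := by
  set m := mat.length with hm
  set n := (mat.getD 0 []).length with hn
  have h1 : solve mat =
      (fun st : List Int × List Int × List (Nat × Nat) =>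
        st.2.2.foldl (fun cnt p => if st.1.getD p.1 0 = 1 ∧ st.2.1.getD p.2 0 = 1 then cnt + 1 else cnt) 0)
      ((pvGrid m n).foldl (pvStepA mat)
        (List.replicate m (0 : Int), List.replicate n (0 : Int), ([] : List (Nat × Nat)))) := by
    rw [← nested_to_grid]
    rfl
  rw [h1]
  have hstep : pvStepA mat = fun st p =>
      (if pvEnt mat p = 1 then st.1.set p.1 (st.1.getD p.1 0 + 1) else st.1,
       if pvEnt mat p = 1 then st.2.1.set p.2 (st.2.1.getD p.2 0 + 1) else st.2.1,
       if pvEnt mat p = 1 then st.2.2 ++ [p] else st.2.2) := by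
    funext st p; unfold pvStepA; split_ifs <;> rfl
  rw [hstep]
  have h2 := foldl_prod3
    (fun r (p : Nat × Nat) => if pvEnt mat p = 1 then r.set p.1 (r.getD p.1 0 + 1) else r)
    (fun c (p : Nat × Nat) => if pvEnt mat p = 1 then c.set p.2 (c.getD p.2 0 + 1) else c)
    (fun l (p : Nat × Nat) => if pvEnt mat p = 1 then l ++ [p] else l)
    (pvGrid m n) (List.replicate m (0 : Int)) (List.replicate n (0 : Int)) ([] : List (Nat × Nat))
  simp only at h2
  rw [h2]
  simp only
  rw [PySem.List.foldl_append_ite_eq_filter (p := fun p : Nat × Nat => pvEnt mat p = 1), List.nil_append]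
  rw [PySem.List.foldl_ite_add_one]
  rw [List.countP_filter, Int.zero_add]
  have hrc : ∀ p : Nat × Nat, p ∈ pvGrid m n →
      ((pvGrid m n).foldl (fun r (p : Nat × Nat) => if pvEnt mat p = 1 then r.set p.1 (r.getD p.1 0 + 1) else r)
        (List.replicate m (0 : Int))).getD p.1 0 = (pvRT mat p.1 : Int) := by
    intro p hp
    have hp1 : p.1 < m := (mem_pvGrid.1 hp).1
    rw [foldl_set_incr (key := Prod.fst) (q := fun p : Nat × Nat => pvEnt mat p = 1) _ _ _
      (by simpa using hp1)]
    rw [List.getD_replicate _ hp1]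
    rw [countP_grid_fst m n p.1 hp1]
    simp [pvRT, hn]
  have hcc : ∀ p : Nat × Nat, p ∈ pvGrid m n →
      ((pvGrid m n).foldl (fun c (p : Nat × Nat) => if pvEnt mat p = 1 then c.set p.2 (c.getD p.2 0 + 1) else c)
        (List.replicate n (0 : Int))).getD p.2 0 = (pvCT mat p.2 : Int) := by
    intro p hp
    have hp2 : p.2 < n := (mem_pvGrid.1 hp).2
    rw [foldl_set_incr (key := Prod.snd) (q := fun p : Nat × Nat => pvEnt mat p = 1) _ _ _
      (by simpa using hp2)]
    rw [List.getD_replicate _ hp2]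
    rw [countP_grid_snd m n p.2 hp2]
    simp [pvCT, hm]
  unfold pvCommon
  rw [← hm, ← hn]
  congr 1
  apply List.countP_congr
  intro p hp
  rw [hrc p hp, hcc p hp]
  simp only [Bool.and_eq_true, decide_eq_true_eq, Nat.cast_eq_one]
  tauto

-- B's on-demand column scan computes pvCT (under rectangularity, for an in-range column)
theorem lone_eq_pvCT (mat : List (List Int)) (j : Nat)
    (hrect : ∀ r ∈ mat, r.length = (mat.getD 0 []).length)
    (hj : j < (mat.getD 0 []).length) :
    loneOneInColumn mat j = decide (pvCT mat j = 1) := by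
  unfold loneOneInColumn
  have hc : mat.countP (fun row => PySem.List.pyGet? row (j : Int) == some 1)
      = pvCT mat j := by
    have h1 : mat.countP (fun row => PySem.List.pyGet? row (j : Int) == some 1)
        = mat.countP (fun r => decide (PySem.List.pyGet? r (j : Int) = some 1)) := by
      apply List.countP_congr; intro r _; simp
    rw [h1, countP_eq_countP_range (fun r => PySem.List.pyGet? r (j : Int) = some 1) mat]
    unfold pvCT
    apply List.countP_congr
    intro i hi
    have hilen : (mat.getD i []).length = (mat.getD 0 []).length := by
      apply hrect
      rw [List.getD_eq_getElem _ _ (by simpa using List.mem_range.1 hi)]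
      exact List.getElem_mem _
    have hjlt : j < (mat.getD i []).length := by omega
    simp only [decide_eq_true_eq]
    rw [PySem.List.pyGet?_natCast, List.getElem?_eq_getElem hjlt]
    rw [pvEnt]
    rw [List.getD_eq_getElem _ _ hjlt]
    simp
  rw [hc]
  by_cases héén : pvCT mat j = 1 <;> simp [héén]

theorem solve_alt_eq_common (mat : List (List Int)) (h : Pre_solve mat) :
    solve_alt mat = (pvCommon mat : Int) := by
  obtain ⟨-, hrect⟩ := h
  set m := mat.length with hm
  set n := (mat.getD 0 []).length with hn
  -- B as a countP over the rows
  unfold solve_alt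
  have hbody : (fun (count : Int) (row : List Int) =>
      if row.count 1 = 1 then
        if loneOneInColumn mat ((PySem.List.index? row 1).getD 0) then count + 1 else count
      else count)
      = fun count row =>
        if (row.count 1 = 1 ∧ loneOneInColumn mat ((PySem.List.index? row 1).getD 0) = true)
        then count + 1 else count := by
    funext c r; split_ifs with h1 h2 h3 <;> first | rfl | (exfalso; tauto)
  rw [hbody, PySem.List.foldl_ite_add_one, Int.zero_add]
  -- the common form as a per-row sum
  have hcommon : pvCommon mat
      = ((List.range m).map (fun i => (List.range n).countP
          (fun j => decide (pvEnt mat (i, j) = 1 ∧ pvRT mat i = 1 ∧ pvCT mat j = 1)))).sum := by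
    unfold pvCommon pvGrid
    rw [← hm, ← hn, List.countP_flatMap]
    congr 1
    apply List.map_congr_left
    intro i _
    simp [List.countP_map, Function.comp_def]
  congr 1
  rw [countP_eq_countP_range
    (fun row => row.count 1 = 1 ∧ loneOneInColumn mat ((PySem.List.index? row 1).getD 0) = true) mat,
    ← hm, hcommon, ← sum_map_ite_eq_countP]
  refine congrArg List.sum (List.map_congr_left ?_)
  intro i hi
  have him : i < m := List.mem_range.1 hi
  set r := mat.getD i [] with hr
  have hrmem : r ∈ mat := by
    rw [hr, List.getD_eq_getElem _ _ him]; exact List.getElem_mem _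
  have hrlen : r.length = n := hrect r hrmem
  -- row count bridge: pvRT i = r.count 1
  have hRT : pvRT mat i = r.count 1 := by
    have := count_take_eq_countP r n (by omega)
    rw [← hrlen, List.take_length] at this
    rw [pvRT, ← hn]
    rw [hrlen] at this
    rw [this]
    apply List.countP_congr
    intro j _
    simp [pvEnt, hr, List.getD_eq_getElem?_getD]
  by_cases hcnt : r.count 1 = 1
  · -- the unique 1 of the row sits at j0 = r.idxOf 1
    have hmem1 : (1 : Int) ∈ r := List.count_pos_iff.1 (by omega)
    obtain ⟨j0, hk⟩ := Option.isSome_iff_exists.1 ((PySem.List.index?_isSome_iff r 1).2 hmem1)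
    obtain ⟨hj0lt, hget, -⟩ := PySem.List.getElem_of_index?_eq_some hk
    have hidx : (PySem.List.index? r 1).getD 0 = j0 := by rw [hk]; rfl
    have hj0n : j0 < n := by omega
    have hgetD : r.getD j0 0 = 1 := by rw [List.getD_eq_getElem _ _ hj0lt, hget]
    have hRT1 : pvRT mat i = 1 := by rw [hRT]; exact hcnt
    -- uniqueness of the 1-column in row i
    have huniq : ∀ j ∈ List.range n, r.getD j 0 = 1 → j = j0 := by
      have h1 : (List.range n).countP (fun j => decide (r.getD j 0 = 1)) = 1 := by
        have := count_take_eq_countP r n (by omega)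
        rw [← hrlen, List.take_length, hrlen] at this
        omega
      exact fun j hj hpj => countP_one_unique (fun j => r.getD j 0 = 1) (List.range n)
        List.nodup_range h1 j0 (List.mem_range.2 hj0n) hgetD j hj hpj
    have hcongr : (List.range n).countP
        (fun j => decide (pvEnt mat (i, j) = 1 ∧ pvRT mat i = 1 ∧ pvCT mat j = 1))
        = (List.range n).countP (fun j => decide (pvCT mat j0 = 1 ∧ j = j0)) := by
      apply List.countP_congr
      intro j hj
      simp only [decide_eq_true_eq]
      constructor
      · rintro ⟨he, -, hct⟩
        have hjj0 : j = j0 := huniq j hj (by simpa [pvEnt, ← hr] using he)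
        exact ⟨hjj0 ▸ hct, hjj0⟩
      · rintro ⟨hct, rfl⟩
        exact ⟨by simpa [pvEnt, ← hr] using hgetD, hRT1, hct⟩
    rw [hcongr, countP_onehot (fun _ => pvCT mat j0 = 1) (List.range n)
      List.nodup_range j0 (List.mem_range.2 hj0n)]
    rw [hidx, lone_eq_pvCT mat j0 hrect (by omega)]
    simp [hcnt]
  · -- no candidate row: both sides are 0
    have hz : (List.range n).countP
        (fun j => decide (pvEnt mat (i, j) = 1 ∧ pvRT mat i = 1 ∧ pvCT mat j = 1)) = 0 := by
      rw [List.countP_eq_zero]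
      intro j _
      simp only [decide_eq_true_eq, not_and]
      intro _ hrt
      exact absurd (hRT ▸ hrt) hcnt
    rw [hz]
    simp [hcnt]

-- ===== VERDICT (by name: the statement is the Claim_ definition above) =====
theorem solve_spec : Claim_equal_solve := by
  intro mat _ hpre
  unfold Spec_solve
  rw [solve_eq_common mat, solve_alt_eq_common mat hpre]
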